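-- pv_equiv track=rewrite | github.com/3D-Printing-Discord/BenchyBot | modules/Scheduler/Scheduler.py | days_code_2_human
-- ===== SOURCE A (Python) =====
-- def days_code_2_human(input_str):
--     lookup_dict = {
--         '0': 'Mon ',
--         '1': 'Tue ',
--         '2': 'Wed ',
--         '3': 'Thu ',
--         '4': 'Fri ',
--         '5': 'Sat ',
--         '6': 'Sun '
--     }
--
--     output = input_str
--     for k, v in lookup_dict.items():
--         output = output.replace(k, v)
--
--     return output
-- ===== SOURCE B (Python) =====
-- def days_code_2_human(input_str):
--     days = ('Mon ', 'Tue ', 'Wed ', 'Thu ', 'Fri ', 'Sat ', 'Sun ')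
--     parts = []
--     for c in input_str:
--         if '0' <= c <= '6':
--             parts.append(days[ord(c) - 48])
--         else:
--             parts.append(c)
--     return ''.join(parts)
-- ===== Notes on version B (the rewrite author's own statement) =====
-- stated objective: simpler
-- what changed: Replaces seven sequential full-string .replace passes (and the dict) with one left-to-right pass that appends, per character, either the day name selected by ord(c)-48 from a tuple or the character itself, then joins once; exact because no replacement string contains a digit.
import Mathlib
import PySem

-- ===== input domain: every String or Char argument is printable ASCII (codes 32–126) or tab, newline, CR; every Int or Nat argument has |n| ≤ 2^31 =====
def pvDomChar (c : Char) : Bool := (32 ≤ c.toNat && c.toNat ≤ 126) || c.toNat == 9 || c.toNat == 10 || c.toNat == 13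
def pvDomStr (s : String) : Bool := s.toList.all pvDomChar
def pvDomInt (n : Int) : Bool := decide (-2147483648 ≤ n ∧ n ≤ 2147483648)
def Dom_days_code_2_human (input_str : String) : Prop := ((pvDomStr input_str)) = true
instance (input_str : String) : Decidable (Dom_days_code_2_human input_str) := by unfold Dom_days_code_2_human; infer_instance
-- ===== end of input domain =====

-- B replaces A's seven sequential full-string .replace passes (and the dict) with one
-- left-to-right pass that appends, per character, the day name indexed by ord(c)-48 from a
-- tuple, or the character itself, then joins once (objective: simpler; exact because no
-- replacement string contains a digit).

-- ===== PORT A =====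
def days_code_2_human (input_str : String) : String :=
  let lookup_dict : PySem.Dict String String :=
    PySem.Dict.ofList [("0", "Mon "), ("1", "Tue "), ("2", "Wed "), ("3", "Thu "),
                       ("4", "Fri "), ("5", "Sat "), ("6", "Sun ")]
  lookup_dict.items.foldl (fun output kv => PySem.Str.replace output kv.1 kv.2) input_str

-- ===== PORT B =====
-- days[ord(c) - 48]: the guard '0' ≤ c ≤ '6' puts the index in range, so getD is exact there.
def days_code_2_human_alt (input_str : String) : String :=
  let days : List String := ["Mon ", "Tue ", "Wed ", "Thu ", "Fri ", "Sat ", "Sun "]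
  let parts : List String := input_str.toList.foldl
    (fun parts c =>
      if '0' ≤ c ∧ c ≤ '6' then parts ++ [days.getD (c.toNat - 48) ""]
      else parts ++ [String.ofList [c]]) []
  PySem.Str.join "" parts

-- ===== PRECONDITION & SPEC =====
def Spec_days_code_2_human (input_str : String) (out : String) : Prop := out = days_code_2_human_alt input_str
instance (input_str : String) (out : String) : Decidable (Spec_days_code_2_human input_str out) := by unfold Spec_days_code_2_human; infer_instance

-- ===== CLAIM (what is proved, stated in full; the proofs are below) =====
def Claim_equal_days_code_2_human : Prop := ∀ (input_str : String), Dom_days_code_2_human input_str → Spec_days_code_2_human input_str (days_code_2_human input_str)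

-- ===== LEMMAS AND PROOFS =====

-- PySem.Chars.join with the empty separator is list flattening.
lemma join_nil_flatten : ∀ xss : List (List Char), PySem.Chars.join [] xss = xss.flatten
  | [] => rfl
  | [x] => by simp [PySem.Chars.join, List.intercalate, List.intersperse]
  | x :: y :: t => by
    have ih := join_nil_flatten (y :: t)
    simp only [PySem.Chars.join, List.intercalate, List.intersperse] at ih ⊢
    simp_all

-- one character substitution step (what a single-char .replace does to each character)
def subst (k : Char) (v : List Char) (l : List Char) : List Char :=
  l.flatMap (fun c => if c = k then v else [c])

lemma go_single (k : Char) (v : List Char) : ∀ (l : List Char) (fuel : Nat) (acc : List Char), l.length ≤ fuel →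
    PySem.Chars.replace.go [k] v fuel l acc = acc.reverse ++ l.flatMap (fun c => if c = k then v else [c]) := by
  intro l
  induction l with
  | nil => intro fuel acc _; cases fuel <;> simp [PySem.Chars.replace.go]
  | cons c t ih =>
    intro fuel acc h
    cases fuel with
    | zero => simp at h
    | succ n =>
      simp only [PySem.Chars.replace.go, List.isPrefixOf]
      by_cases hc : k = c
      · subst hc
        simp only [beq_self_eq_true, Bool.true_and, if_pos, List.length_cons, List.length_nil,
          List.drop_succ_cons, List.drop_zero]
        rw [ih _ (v.reverse ++ acc) (by simpa using h)]
        simp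
      · rw [if_neg (by simp [hc])]
        rw [ih n (c :: acc) (by simpa using h)]
        simp [Ne.symm hc]

-- replacing a single-character pattern is the per-character substitution subst
lemma replace_single (k : Char) (v : List Char) (s : List Char) :
    PySem.Chars.replace s [k] v = subst k v s := by
  simp only [PySem.Chars.replace, List.isEmpty_cons, Bool.false_eq_true, if_false]
  rw [go_single k v s s.length [] le_rfl]
  simp [subst]

lemma subst_append (k : Char) (v a b : List Char) :
    subst k v (a ++ b) = subst k v a ++ subst k v b := by
  simp [subst]

-- B's per-character contribution, as a char list
def gB (c : Char) : List Char :=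
  if '0' ≤ c ∧ c ≤ '6'
  then ((["Mon ", "Tue ", "Wed ", "Thu ", "Fri ", "Sat ", "Sun "] : List String).getD (c.toNat - 48) "").toList
  else [c]

-- A's seven substitutions applied to a single character give exactly B's contribution
lemma char_eq (c : Char) :
    subst '6' "Sun ".toList (subst '5' "Sat ".toList (subst '4' "Fri ".toList
      (subst '3' "Thu ".toList (subst '2' "Wed ".toList (subst '1' "Tue ".toList
        (subst '0' "Mon ".toList [c])))))) = gB c := by
  by_cases h0 : c = '0'; · subst h0; decide
  by_cases h1 : c = '1'; · subst h1; decide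
  by_cases h2 : c = '2'; · subst h2; decide
  by_cases h3 : c = '3'; · subst h3; decide
  by_cases h4 : c = '4'; · subst h4; decide
  by_cases h5 : c = '5'; · subst h5; decide
  by_cases h6 : c = '6'; · subst h6; decide
  have hguard : ¬ ('0' ≤ c ∧ c ≤ '6') := by
    rintro ⟨hl, hr⟩
    have hl' : 48 ≤ c.toNat := hl
    have hr' : c.toNat ≤ 54 := hr
    have hv : c.toNat = 48 ∨ c.toNat = 49 ∨ c.toNat = 50 ∨ c.toNat = 51 ∨ c.toNat = 52 ∨
        c.toNat = 53 ∨ c.toNat = 54 := by omega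
    have hchar : ∀ n : Nat, c.toNat = n → c = Char.ofNat n := by
      intro n hn
      have : Char.ofNat c.toNat = Char.ofNat n := by rw [hn]
      rwa [Char.ofNat_toNat] at this
    rcases hv with h | h | h | h | h | h | h <;>
      first
        | exact h0 (by simpa using hchar _ h)
        | exact h1 (by simpa using hchar _ h)
        | exact h2 (by simpa using hchar _ h)
        | exact h3 (by simpa using hchar _ h)
        | exact h4 (by simpa using hchar _ h)
        | exact h5 (by simpa using hchar _ h)
        | exact h6 (by simpa using hchar _ h)
  simp [subst, gB, h0, h1, h2, h3, h4, h5, h6, hguard]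

-- the chain of seven substitutions over a whole string is the flatten of B's contributions
lemma chain_eq (s : List Char) :
    subst '6' "Sun ".toList (subst '5' "Sat ".toList (subst '4' "Fri ".toList
      (subst '3' "Thu ".toList (subst '2' "Wed ".toList (subst '1' "Tue ".toList
        (subst '0' "Mon ".toList s)))))) = (s.map gB).flatten := by
  induction s with
  | nil => rfl
  | cons c t ih =>
    have hsplit : subst '0' "Mon ".toList (c :: t)
        = subst '0' "Mon ".toList [c] ++ subst '0' "Mon ".toList t := by
      simp [subst]
    rw [hsplit, subst_append, subst_append, subst_append, subst_append, subst_append,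
      subst_append, ih, char_eq]
    simp

-- B's accumulator loop builds exactly the per-character map
lemma foldl_parts (f : Char → String) : ∀ (l : List Char) (acc : List String),
    List.foldl (fun parts c => parts ++ [f c]) acc l = acc ++ l.map f := by
  intro l
  induction l with
  | nil => simp
  | cons c t ih => intro acc; simp [List.foldl, ih]

-- ===== VERDICT (by name: the statement is the Claim_ definition above) =====
theorem days_code_2_human_spec : Claim_equal_days_code_2_human := by
  intro s _
  show days_code_2_human s = days_code_2_human_alt s
  show List.foldl (fun output kv => PySem.Str.replace output kv.1 kv.2) s
      (PySem.Dict.ofList [("0", "Mon "), ("1", "Tue "), ("2", "Wed "), ("3", "Thu "),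
        ("4", "Fri "), ("5", "Sat "), ("6", "Sun ")] : PySem.Dict String String).items
    = PySem.Str.join "" (List.foldl
        (fun parts c =>
          if '0' ≤ c ∧ c ≤ '6'
          then parts ++ [(["Mon ", "Tue ", "Wed ", "Thu ", "Fri ", "Sat ", "Sun "] : List String).getD (c.toNat - 48) ""]
          else parts ++ [String.ofList [c]]) [] s.toList)
  have hA : (PySem.Dict.ofList [("0", "Mon "), ("1", "Tue "), ("2", "Wed "), ("3", "Thu "),
      ("4", "Fri "), ("5", "Sat "), ("6", "Sun ")] : PySem.Dict String String).items
      = [("0", "Mon "), ("1", "Tue "), ("2", "Wed "), ("3", "Thu "),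
         ("4", "Fri "), ("5", "Sat "), ("6", "Sun ")] := by decide
  rw [hA]
  simp only [List.foldl]
  have hlam : (fun (parts : List String) (c : Char) =>
        if '0' ≤ c ∧ c ≤ '6'
        then parts ++ [(["Mon ", "Tue ", "Wed ", "Thu ", "Fri ", "Sat ", "Sun "] : List String).getD (c.toNat - 48) ""]
        else parts ++ [String.ofList [c]])
      = (fun (parts : List String) (c : Char) => parts ++
          [if '0' ≤ c ∧ c ≤ '6'
           then (["Mon ", "Tue ", "Wed ", "Thu ", "Fri ", "Sat ", "Sun "] : List String).getD (c.toNat - 48) ""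
           else String.ofList [c]]) := by
    funext p c; split_ifs <;> rfl
  rw [hlam]
  rw [foldl_parts (fun c => if '0' ≤ c ∧ c ≤ '6'
        then (["Mon ", "Tue ", "Wed ", "Thu ", "Fri ", "Sat ", "Sun "] : List String).getD (c.toNat - 48) ""
        else String.ofList [c]) s.toList []]
  -- compare through character lists
  have key : (PySem.Str.replace (PySem.Str.replace (PySem.Str.replace (PySem.Str.replace
      (PySem.Str.replace (PySem.Str.replace (PySem.Str.replace s "0" "Mon ") "1" "Tue ")
      "2" "Wed ") "3" "Thu ") "4" "Fri ") "5" "Sat ") "6" "Sun ").toList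
      = (PySem.Str.join "" ([] ++ s.toList.map (fun c => if '0' ≤ c ∧ c ≤ '6'
          then (["Mon ", "Tue ", "Wed ", "Thu ", "Fri ", "Sat ", "Sun "] : List String).getD (c.toNat - 48) ""
          else String.ofList [c]))).toList := by
    simp only [List.nil_append, PySem.Str.replace, PySem.Str.join, String.toList_ofList,
      show ("" : String).toList = [] from by decide]
    rw [join_nil_flatten]
    simp only [show ("0" : String).toList = ['0'] from by decide,
      show ("1" : String).toList = ['1'] from by decide,
      show ("2" : String).toList = ['2'] from by decide,
      show ("3" : String).toList = ['3'] from by decide,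
      show ("4" : String).toList = ['4'] from by decide,
      show ("5" : String).toList = ['5'] from by decide,
      show ("6" : String).toList = ['6'] from by decide,
      replace_single, List.map_map]
    rw [chain_eq s.toList]
    congr 1
    apply List.map_congr_left
    intro c _
    by_cases h : '0' ≤ c ∧ c ≤ '6' <;> simp [gB, h, Function.comp]
  have h2 := congrArg String.ofList key
  simpa only [String.ofList_toList] using h2
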